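-- pv_equiv track=rewrite | github.com/viniciussaporto/AoC2023 | day03/day03.py | get_numbers
-- ===== SOURCE A (Python) =====
-- def get_numbers(line):
--     result = []
--     i = 0
--     num = ""
--     while i < len(line):
--         while i < len(line) and not line[i].isdigit():
--             i += 1
--         start = i
--         while i < len(line) and line[i].isdigit():
--             num += line[i]
--             i += 1
--         if len(num) > 0:
--             result.append((start, num))
--             num = ""
--     return result
--
-- result = 0
-- ===== SOURCE B (Python) =====
-- def get_numbers(line):
--     found = []
--     run = ""
--     for i in range(len(line) - 1, -1, -1):
--         c = line[i]
--         if c.isdigit():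
--             run = c + run
--         elif run:
--             found.append((i + 1, run))
--             run = ""
--     if run:
--         found.append((0, run))
--     found.reverse()
--     return found
-- ===== Notes on version B (the rewrite author's own statement) =====
-- stated objective: alternative
-- what changed: Replaces A's forward index pointer with nested skip/collect while-loops by a single backward for-loop over characters that grows the current run by prepending and emits a (start, run) pair when it steps onto a non-digit, building the result back-to-front and reversing it once at the end.
import Mathlib
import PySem

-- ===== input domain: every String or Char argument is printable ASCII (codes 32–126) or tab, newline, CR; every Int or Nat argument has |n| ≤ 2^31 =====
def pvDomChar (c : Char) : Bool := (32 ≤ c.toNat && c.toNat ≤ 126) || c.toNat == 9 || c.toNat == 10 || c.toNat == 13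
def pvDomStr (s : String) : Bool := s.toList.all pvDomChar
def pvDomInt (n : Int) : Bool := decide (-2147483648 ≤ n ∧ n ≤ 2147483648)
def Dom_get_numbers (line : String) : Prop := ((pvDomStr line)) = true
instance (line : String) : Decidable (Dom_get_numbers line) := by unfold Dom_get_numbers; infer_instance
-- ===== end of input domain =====

-- B replaces A's forward pointer with nested skip/collect while-loops by ONE
-- backward for-loop over the characters: it grows the current digit run by
-- prepending and emits a (start, run) pair on stepping onto a non-digit,
-- building the result back-to-front and reversing once — alternative, same cost.

-- ===== PORT A =====
-- inner `while i < len(line) and not line[i].isdigit(): i += 1`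
def skipA (s : List Char) (i : Nat) : Nat :=
  if h : i < s.length then
    if PySem.Chars.isdigit s[i] then i else skipA s (i + 1)
  else i
termination_by s.length - i
decreasing_by exact Nat.sub_succ_lt_self s.length i h

-- inner `while i < len(line) and line[i].isdigit(): num += line[i]; i += 1`
def collectA (s : List Char) (i : Nat) (num : List Char) : Nat × List Char :=
  if h : i < s.length then
    if PySem.Chars.isdigit s[i] then collectA s (i + 1) (num ++ [s[i]]) else (i, num)
  else (i, num)
termination_by s.length - i
decreasing_by exact Nat.sub_succ_lt_self s.length i h

theorem collectA_fst_ge (s : List Char) (i : Nat) (num : List Char) :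
    i ≤ (collectA s i num).1 := by
  induction i, num using collectA.induct s with
  | case1 i num h hd ih => rw [collectA, dif_pos h, if_pos hd]; omega
  | case2 i num h hd => rw [collectA, dif_pos h, if_neg hd]
  | case3 i num h => rw [collectA, dif_neg h]

theorem skipA_ge (s : List Char) (i : Nat) : i ≤ skipA s i := by
  induction i using skipA.induct s with
  | case1 i h hd => rw [skipA, dif_pos h, if_pos hd]
  | case2 i h hd ih => rw [skipA, dif_pos h, if_neg hd]; omega
  | case3 i h => rw [skipA, dif_neg h]

theorem skipA_stop (s : List Char) (i : Nat) (h : skipA s i < s.length) :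
    PySem.Chars.isdigit s[skipA s i]! = true := by
  induction i using skipA.induct s with
  | case1 i hi hd =>
      rw [skipA, dif_pos hi, if_pos hd] at h ⊢
      rwa [getElem!_pos s i hi]
  | case2 i hi hd ih =>
      rw [skipA, dif_pos hi, if_neg hd] at h ⊢; exact ih h
  | case3 i hi => rw [skipA, dif_neg hi] at h; omega

theorem loopA_dec (s : List Char) (i : Nat) (h : i < s.length) :
    i < (collectA s (skipA s i) []).1 := by
  have hge := skipA_ge s i
  by_cases h1 : skipA s i < s.length
  · have hd := skipA_stop s i h1
    rw [getElem!_pos s _ h1] at hd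
    rw [collectA, dif_pos h1, if_pos hd]
    have := collectA_fst_ge s (skipA s i + 1) ([] ++ [s[skipA s i]'h1])
    omega
  · rw [collectA, dif_neg h1]; omega

-- outer `while i < len(line)` carrying `result`
def loopA (s : List Char) (i : Nat) (result : List (Int × String)) : List (Int × String) :=
  if h : i < s.length then
    let start := skipA s i
    let p := collectA s start []
    loopA s p.1
      (if p.2.length > 0 then result ++ [((start : Int), String.ofList p.2)] else result)
  else result
termination_by s.length - i
decreasing_by exact Nat.sub_lt_sub_left h (loopA_dec s i h)

def get_numbers (line : String) : List (Int × String) := loopA line.toList 0 []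

-- ===== PORT B =====
-- `for i in range(len(line)-1, -1, -1)` threading (found, run): structural
-- recursion computing the suffix's state first (= the earlier loop iterations),
-- then handling character i; i is the absolute index of the head of cs.
def gnB (cs : List Char) (i : Nat) : List (Int × String) × List Char :=
  match cs with
  | [] => ([], [])
  | c :: r =>
    let st := gnB r (i + 1)
    if PySem.Chars.isdigit c then (st.1, c :: st.2)
    else if st.2 ≠ [] then (st.1 ++ [(((i + 1 : Nat) : Int), String.ofList st.2)], [])
    else st

-- trailing `if run: found.append((0, run))` then `found.reverse()`
def get_numbers_alt (line : String) : List (Int × String) :=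
  let st := gnB line.toList 0
  (if st.2 ≠ [] then st.1 ++ [((0 : Int), String.ofList st.2)] else st.1).reverse

-- ===== PRECONDITION & SPEC =====
def Spec_get_numbers (line : String) (out : List (Int × String)) : Prop := out = get_numbers_alt line
instance (line : String) (out : List (Int × String)) : Decidable (Spec_get_numbers line out) := by unfold Spec_get_numbers; infer_instance

-- ===== CLAIM (what is proved, stated in full; the proofs are below) =====
def Claim_equal_get_numbers : Prop := ∀ (line : String), Dom_get_numbers line → Spec_get_numbers line (get_numbers line)

-- ===== LEMMAS AND PROOFS =====

-- common reference: the (start-index, digit-run) pairs of cs with offset i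
def refN (cs : List Char) (i : Nat) : List (Int × String) :=
  match cs with
  | [] => []
  | c :: rest =>
    if PySem.Chars.isdigit c then
      (((i : Nat) : Int), String.ofList (c :: rest.takeWhile (fun d => PySem.Chars.isdigit d))) ::
        refN (rest.dropWhile (fun d => PySem.Chars.isdigit d))
          (i + 1 + (rest.takeWhile (fun d => PySem.Chars.isdigit d)).length)
    else refN rest (i + 1)
termination_by cs.length
decreasing_by
  · exact Nat.lt_succ_of_le (List.length_dropWhile_le _ rest)
  · exact Nat.lt_succ_self _

theorem refN_skip : ∀ (nds rest : List Char) (i : Nat),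
    (∀ c ∈ nds, PySem.Chars.isdigit c = false) →
    refN (nds ++ rest) i = refN rest (i + nds.length) := by
  intro nds
  induction nds with
  | nil => intro rest i _; simp
  | cons c tl ih =>
      intro rest i hnd
      have hc : PySem.Chars.isdigit c = false := hnd c (by simp)
      rw [List.cons_append, refN, if_neg (by simp [hc])]
      rw [ih rest (i + 1) (fun d hd => hnd d (by simp [hd]))]
      simp only [List.length_cons]
      ring_nf

theorem dropWhile_head_false {p : Char → Bool} :
    ∀ (l : List Char) {c : Char} {rst : List Char}, l.dropWhile p = c :: rst → p c = false := by
  intro l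
  induction l with
  | nil => intro c rst h; simp at h
  | cons a tl ih =>
      intro c rst h
      rw [List.dropWhile_cons] at h
      by_cases ha : p a
      · rw [if_pos ha] at h; exact ih h
      · rw [if_neg ha] at h
        cases h; simpa using ha

theorem skipA_eq (s : List Char) (i : Nat) :
    skipA s i = i + ((s.drop i).takeWhile (fun c => !PySem.Chars.isdigit c)).length := by
  induction i using skipA.induct s with
  | case1 i h hd =>
      rw [skipA, dif_pos h, if_pos hd, List.drop_eq_getElem_cons h, List.takeWhile_cons, hd]
      simp
  | case2 i h hd ih =>
      rw [skipA, dif_pos h, if_neg hd, List.drop_eq_getElem_cons h, List.takeWhile_cons]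
      simp only [Bool.not_eq_true] at hd
      simp [hd, ih]; omega
  | case3 i h =>
      rw [skipA, dif_neg h, List.drop_eq_nil_of_le (by omega)]
      simp

theorem collectA_eq (s : List Char) (i : Nat) (num : List Char) : collectA s i num =
    (i + ((s.drop i).takeWhile (fun c => PySem.Chars.isdigit c)).length,
     num ++ (s.drop i).takeWhile (fun c => PySem.Chars.isdigit c)) := by
  induction i, num using collectA.induct s with
  | case1 i num h hd ih =>
      rw [collectA, dif_pos h, if_pos hd, List.drop_eq_getElem_cons h, List.takeWhile_cons, ih]
      simp [hd]; omega
  | case2 i num h hd =>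
      rw [collectA, dif_pos h, if_neg hd, List.drop_eq_getElem_cons h, List.takeWhile_cons]
      simp only [Bool.not_eq_true] at hd
      simp [hd]
  | case3 i num h =>
      rw [collectA, dif_neg h, List.drop_eq_nil_of_le (by omega)]
      simp

theorem loopA_eq (s : List Char) :
    ∀ (n i : Nat) (res : List (Int × String)), s.length - i ≤ n →
      loopA s i res = res ++ refN (s.drop i) i := by
  intro n
  induction n with
  | zero =>
      intro i res hn
      rw [loopA, dif_neg (by omega), List.drop_eq_nil_of_le (by omega), refN]
      simp
  | succ n ih =>
      intro i res hn
      by_cases h : i < s.length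
      · have hdec := loopA_dec s i h
        rw [loopA, dif_pos h]
        simp only [skipA_eq, collectA_eq, List.nil_append]
        set tw := (s.drop i).takeWhile (fun c => !PySem.Chars.isdigit c) with htw
        set dw := (s.drop i).dropWhile (fun c => !PySem.Chars.isdigit c) with hdw
        have hsplit : s.drop i = tw ++ dw := (List.takeWhile_append_dropWhile).symm
        have hdrop1 : s.drop (i + tw.length) = dw := by
          rw [← List.drop_drop, hsplit, List.drop_left']
          omega
        have hrefskip : refN (s.drop i) i = refN dw (i + tw.length) := by
          rw [hsplit, refN_skip tw dw i]
          intro c hc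
          have := List.mem_takeWhile_imp hc
          simpa using this
        rw [hdrop1]
        rcases hdwcases : dw with _ | ⟨c, rst⟩
        · simp only [List.takeWhile_nil, List.length_nil, Nat.add_zero]
          rw [if_neg (by simp)]
          have hlen : s.length ≤ i + tw.length := by
            have : s.drop (i + tw.length) = [] := by rw [hdrop1, hdwcases]
            have := List.drop_eq_nil_iff.mp this
            omega
          rw [loopA, dif_neg (by omega), hrefskip, hdwcases, refN]
          simp
        · have hc : PySem.Chars.isdigit c = true := by
            have := dropWhile_head_false (p := fun c => !PySem.Chars.isdigit c) (s.drop i) hdwcases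
            simpa using this
          simp only [List.takeWhile_cons, hc, if_pos, List.length_cons]
          rw [if_pos (by simp)]
          have hdrop2 : s.drop (i + tw.length + ((rst.takeWhile (fun c => PySem.Chars.isdigit c)).length + 1))
              = rst.dropWhile (fun c => PySem.Chars.isdigit c) := by
            rw [← List.drop_drop, hdrop1, hdwcases]
            have : (c :: rst).drop ((rst.takeWhile (fun c => PySem.Chars.isdigit c)).length + 1)
                = rst.drop (rst.takeWhile (fun c => PySem.Chars.isdigit c)).length := by
              simp [List.drop_succ_cons]
            rw [this, ← List.takeWhile_append_dropWhile (p := fun c => PySem.Chars.isdigit c) (l := rst),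
              List.drop_left']
            · simp
            · simp
          have hih := ih (i + tw.length + ((rst.takeWhile (fun c => PySem.Chars.isdigit c)).length + 1))
            (res ++ [(((i + tw.length : Nat) : Int),
              String.ofList (c :: rst.takeWhile (fun c => PySem.Chars.isdigit c)))])
            (by
              have : i < i + tw.length + ((rst.takeWhile (fun c => PySem.Chars.isdigit c)).length + 1) := by omega
              omega)
          rw [hih, hdrop2, hrefskip, hdwcases, refN, if_pos hc]
          simp only [List.append_assoc, List.cons_append, List.nil_append]
          ring_nf
      · rw [loopA, dif_neg h, List.drop_eq_nil_of_le (by omega), refN]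
        simp

theorem takeWhile_nil_dropWhile_self {p : Char → Bool} (l : List Char)
    (h : l.takeWhile p = []) : l.dropWhile p = l := by
  cases l with
  | nil => simp
  | cons c r =>
      rw [List.takeWhile_cons] at h
      by_cases hc : p c
      · rw [if_pos hc] at h; simp at h
      · rw [List.dropWhile_cons, if_neg hc]

-- the backward loop's state: pending run = leading digit prefix of cs, and the
-- emitted pairs = the runs strictly after it, in reverse (emission) order
theorem gnB_eq : ∀ (cs : List Char) (i : Nat),
    gnB cs i = ((refN (cs.dropWhile (fun d => PySem.Chars.isdigit d))
                  (i + (cs.takeWhile (fun d => PySem.Chars.isdigit d)).length)).reverse,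
                cs.takeWhile (fun d => PySem.Chars.isdigit d)) := by
  intro cs
  induction cs with
  | nil => intro i; simp [gnB, refN]
  | cons c r ih =>
      intro i
      rw [gnB]
      simp only [ih (i + 1)]
      by_cases hc : PySem.Chars.isdigit c = true
      · rw [if_pos hc, List.takeWhile_cons, List.dropWhile_cons, if_pos hc, if_pos hc]
        simp only [List.length_cons]
        ring_nf
      · have hc' : PySem.Chars.isdigit c = false := by simpa using hc
        simp only [List.takeWhile_cons, List.dropWhile_cons, hc', Bool.false_eq_true,
          if_false, List.length_nil, Nat.add_zero]
        rcases htw : r.takeWhile (fun d => PySem.Chars.isdigit d) with _ | ⟨d, tl⟩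
        · rw [if_neg (by simp)]
          rw [takeWhile_nil_dropWhile_self r htw]
          rw [refN, if_neg (by simp [hc'])]
          simp [htw]
        · rw [if_pos (by simp)]
          rw [refN, if_neg (by simp [hc'])]
          rcases hr : r with _ | ⟨r0, rr⟩
          · rw [hr] at htw; simp at htw
          · rw [hr, List.takeWhile_cons] at htw
            by_cases h0 : PySem.Chars.isdigit r0
            · rw [if_pos h0] at htw
              have h1 : r0 = d := (List.cons.injEq _ _ _ _ ▸ htw).1
              have h2 : rr.takeWhile (fun d => PySem.Chars.isdigit d) = tl :=
                (List.cons.injEq _ _ _ _ ▸ htw).2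
              subst h1
              rw [refN, if_pos h0]
              simp only [List.dropWhile_cons, h0, if_true, h2, List.reverse_cons,
                List.length_cons]
              ring_nf
            · rw [if_neg h0] at htw; simp at htw

-- ===== VERDICT (by name: the statement is the Claim_ definition above) =====
theorem get_numbers_spec : Claim_equal_get_numbers := by
  intro line _
  unfold Spec_get_numbers get_numbers get_numbers_alt
  rw [loopA_eq line.toList (line.toList.length) 0 [] (by omega)]
  simp only [gnB_eq, List.nil_append, List.drop_zero]
  rcases htw : line.toList.takeWhile (fun d => PySem.Chars.isdigit d) with _ | ⟨d, tl⟩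
  · simp only [ne_eq, not_true_eq_false, if_neg, List.reverse_reverse, not_false_eq_true]
    rw [takeWhile_nil_dropWhile_self _ htw]
    simp
  · simp only [ne_eq, reduceCtorEq, not_false_eq_true, if_pos, List.reverse_append,
      List.reverse_reverse, List.reverse_cons, List.reverse_nil, List.nil_append,
      List.length_nil, Nat.zero_add, List.cons_append, List.singleton_append]
    rcases hl : line.toList with _ | ⟨c, r⟩
    · rw [hl] at htw; simp at htw
    · rw [hl] at htw
      rw [List.takeWhile_cons] at htw
      by_cases hc : PySem.Chars.isdigit c
      · rw [if_pos hc] at htw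
        have hcd : c = d := (List.cons.injEq _ _ _ _ ▸ htw).1
        have htl : r.takeWhile (fun d => PySem.Chars.isdigit d) = tl :=
          (List.cons.injEq _ _ _ _ ▸ htw).2
        subst hcd
        rw [refN, if_pos hc]
        simp only [List.dropWhile_cons, hc, if_true, if_pos, htl]
        simp [Nat.add_comm]
      · rw [if_neg hc] at htw; simp at htw
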